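-- pv_equiv track=rewrite | github.com/bradmartin333/SandboxUI | SandboxUI/Show-N-Tell/Items/crsettings.py | itemstostr
-- ===== SOURCE A (Python) =====
-- def itemstostr(items):
--     matchitems = [('Min', 'n/a'), ('Max', 'n/a'), ('Default', 'n/a')]
--     for item in items:
--         for i in range(len(matchitems)):
--             if matchitems[i][0] in item:
--                 matchitems[i] = (matchitems[i][0], item.split('= ')[1])
--     output = ''
--     for matchitem in matchitems:
--         output += matchitem[0] + ': ' + matchitem[1] + ', '
--     return ' (' + output[:-2] + ')\n'
-- ===== SOURCE B (Python) =====
-- def itemstostr(items):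
--     def value(label):
--         vals = [item.split('= ')[1] for item in items if label in item]
--         return vals[-1] if vals else 'n/a'
--     return ' (' + ', '.join(label + ': ' + value(label)
--                             for label in ('Min', 'Max', 'Default')) + ')\n'
-- ===== Notes on version B (the rewrite author's own statement) =====
-- stated objective: simpler
-- what changed: B loops over the three labels on the outside, taking the last '= '-split value among the items containing each label and joining the three parts with ', ', instead of A's single item pass that mutates a parallel (label, value) list and trims the trailing ', ' with [:-2].
import Mathlib
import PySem

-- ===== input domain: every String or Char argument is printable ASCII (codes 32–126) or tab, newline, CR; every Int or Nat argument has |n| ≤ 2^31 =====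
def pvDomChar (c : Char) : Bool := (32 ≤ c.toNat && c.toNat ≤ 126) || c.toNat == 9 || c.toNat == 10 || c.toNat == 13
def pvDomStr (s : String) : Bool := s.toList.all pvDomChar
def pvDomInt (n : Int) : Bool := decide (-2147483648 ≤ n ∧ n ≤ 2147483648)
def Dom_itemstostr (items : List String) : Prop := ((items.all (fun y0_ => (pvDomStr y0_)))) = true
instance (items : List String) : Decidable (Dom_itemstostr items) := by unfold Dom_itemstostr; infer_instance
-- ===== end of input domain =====

-- B inverts the traversal: labels outer / items inner, joining per-label last matches, instead of
-- mutating a parallel (label, value) list once per item; objective: simpler.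

-- item.split('= ')[1]  (shared subexpression of both Pythons; '= ' ≠ '' so split? is always some;
-- the [1] raises IndexError when '= ' does not occur — those inputs are outside Pre_, getD "" is never used there)
def pvVal (item : String) : String :=
  (PySem.List.pyGet? ((PySem.Str.split? item "= ").getD []) 1).getD ""

-- ===== PORT A =====
def itemstostr (items : List String) : String :=
  let matchitems :=
    items.foldl (fun mi item =>
      (PySem.List.pyRange 0 mi.length 1).foldl (fun acc i =>
        match PySem.List.pyGet? acc i with
        | some mi_i => if PySem.Str.isIn mi_i.1 item then acc.set i.toNat (mi_i.1, pvVal item) else acc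
        | none => acc) mi)
      [("Min", "n/a"), ("Max", "n/a"), ("Default", "n/a")]
  let output := matchitems.foldl (fun o mi => o ++ mi.1 ++ ": " ++ mi.2 ++ ", ") ""
  " (" ++ PySem.Str.slice output none (some (-2)) ++ ")\n"

-- ===== PORT B =====
def pvValue (items : List String) (label : String) : String :=
  let vals := (items.filter (fun item => PySem.Str.isIn label item)).map pvVal
  (PySem.List.pyGet? vals (-1)).getD "n/a"

def itemstostr_alt (items : List String) : String :=
  " (" ++ PySem.Str.join ", "
      (["Min", "Max", "Default"].map (fun label => label ++ ": " ++ pvValue items label)) ++ ")\n"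

-- ===== PRECONDITION & SPEC =====
-- Pre_ excludes exactly the items that contain one of the three labels but no '= ':
-- there A (and B alike) raises IndexError on item.split('= ')[1].
def Pre_itemstostr (items : List String) : Prop :=
  ∀ item ∈ items,
    (PySem.Str.isIn "Min" item || PySem.Str.isIn "Max" item || PySem.Str.isIn "Default" item) = true →
    PySem.Str.isIn "= " item = true

instance (items : List String) : Decidable (Pre_itemstostr items) := by
  unfold Pre_itemstostr; infer_instance

def pvWitness_itemstostr : List String := ["Min = 1", "Max = 9", "foo"]

def Spec_itemstostr (items : List String) (out : String) : Prop := out = itemstostr_alt items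
instance (items : List String) (out : String) : Decidable (Spec_itemstostr items out) := by
  unfold Spec_itemstostr; infer_instance

-- ===== CLAIM (what is proved, stated in full; the proofs are below) =====
def Claim_equal_itemstostr : Prop :=
  ∀ (items : List String), Dom_itemstostr items → Pre_itemstostr items → Spec_itemstostr items (itemstostr items)

-- ===== LEMMAS AND PROOFS =====

-- last-match accumulator shared by the two characterizations
def pvLast (items : List String) (label : String) (a : String) : String :=
  items.foldl (fun acc it => if PySem.Str.isIn label it then pvVal it else acc) a

theorem pv_step (a b c item : String) :
    (PySem.List.pyRange 0 ([("Min", a), ("Max", b), ("Default", c)] : List (String × String)).length 1).foldl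
      (fun acc i =>
        match PySem.List.pyGet? acc i with
        | some mi_i => if PySem.Str.isIn mi_i.1 item then acc.set i.toNat (mi_i.1, pvVal item) else acc
        | none => acc) [("Min", a), ("Max", b), ("Default", c)]
    = [("Min", if PySem.Str.isIn "Min" item then pvVal item else a),
       ("Max", if PySem.Str.isIn "Max" item then pvVal item else b),
       ("Default", if PySem.Str.isIn "Default" item then pvVal item else c)] := by
  have h3 : ∀ (l : List (String × String)), l.length = 3 → PySem.List.pyRange 0 l.length 1 = [0, 1, 2] := by
    intro l h; rw [h]; decide
  rw [h3 _ rfl]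
  cases hm : PySem.Chars.isIn ['M', 'i', 'n'] item.toList <;>
    cases hx : PySem.Chars.isIn ['M', 'a', 'x'] item.toList <;>
      cases hd : PySem.Chars.isIn ['D', 'e', 'f', 'a', 'u', 'l', 't'] item.toList <;>
        simp [List.foldl_cons, List.foldl_nil, hm, hx, hd]

theorem pv_state (items : List String) (a b c : String) :
    items.foldl (fun mi item =>
      (PySem.List.pyRange 0 mi.length 1).foldl (fun acc i =>
        match PySem.List.pyGet? acc i with
        | some mi_i => if PySem.Str.isIn mi_i.1 item then acc.set i.toNat (mi_i.1, pvVal item) else acc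
        | none => acc) mi)
      [("Min", a), ("Max", b), ("Default", c)]
    = [("Min", pvLast items "Min" a), ("Max", pvLast items "Max" b),
       ("Default", pvLast items "Default" c)] := by
  induction items generalizing a b c with
  | nil => simp [pvLast]
  | cons item rest ih =>
      rw [List.foldl_cons, pv_step, ih]
      simp [pvLast]

theorem pvGetNegOne {α : Type} (xs : List α) : PySem.List.pyGet? xs (-1) = xs.getLast? := by
  cases xs with
  | nil => rfl
  | cons x t =>
    rw [List.getLast?_eq_getElem?]
    simp [PySem.List.pyGet?, PySem.List.pyIdx?]

theorem pvLastFold {α β : Type} (p : α → Bool) (v : α → β) (l : List α) (a : β) :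
    (((l.filter p).map v).getLast?).getD a = l.foldl (fun acc it => if p it then v it else acc) a := by
  induction l generalizing a with
  | nil => simp
  | cons x xs ih =>
      by_cases hx : p x = true
      · simp only [List.filter_cons, hx, if_true, List.map_cons, List.getLast?_cons, List.foldl_cons]
        rw [← ih (v x)]
        cases ((xs.filter p).map v).getLast? <;> simp
      · have hx' : ¬ p x = true := by simp [hx]
        rw [List.filter_cons_of_neg hx', List.foldl_cons]
        simpa [hx] using ih a

theorem pv_take (l : List Char) :
    (l ++ ", ".toList).take ((l ++ ", ".toList).length - 2) = l := by
  simp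

theorem pv_value_eq (items : List String) (label : String) :
    pvValue items label = pvLast items label "n/a" := by
  unfold pvValue pvLast
  simp only []
  rw [pvGetNegOne]
  exact pvLastFold _ _ _ _

theorem pv_final (x y z : String) :
    " (" ++ PySem.Str.slice
      (([("Min", x), ("Max", y), ("Default", z)] : List (String × String)).foldl
        (fun o mi => o ++ mi.1 ++ ": " ++ mi.2 ++ ", ") "") none (some (-2)) ++ ")\n"
    = " (" ++ PySem.Str.join ", " ["Min" ++ ": " ++ x, "Max" ++ ": " ++ y, "Default" ++ ": " ++ z] ++ ")\n" := by
  apply String.toList_injective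
  simp only [List.foldl_cons, List.foldl_nil, String.toList_append, PySem.Str.toList_slice,
    PySem.Str.toList_join, List.map_cons, List.map_nil, PySem.Chars.join_cons_cons, PySem.Chars.slice]
  rw [show ((-2 : Int)) = -((2:Nat):Int) by norm_num,
    PySem.List.slice_to_neg_natCast _ 2 (by norm_num), pv_take]
  simp [PySem.Chars.join, List.intercalate]

-- ===== VERDICT (by name: the statement is the Claim_ definition above) =====
theorem itemstostr_spec : Claim_equal_itemstostr := by
  intro items _ _
  unfold Spec_itemstostr itemstostr itemstostr_alt
  rw [pv_state]
  simp only [List.map_cons, List.map_nil, pv_value_eq]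
  exact pv_final _ _ _
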